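-- pv_equiv track=rewrite | github.com/mahi397/ML-Sys-Ops-Project | data/proj07-runtime/proj07_services/retraining/restore_dataset_lineage.py | normalize_meeting_ids
-- ===== SOURCE A (Python) =====
-- from typing import Any
--
-- def normalize_meeting_ids(raw_ids: Any) -> list[str]:
--     if not isinstance(raw_ids, list):
--         return []
--
--     normalized: list[str] = []
--     seen: set[str] = set()
--     for raw_value in raw_ids:
--         meeting_id = str(raw_value or "").strip()
--         if not meeting_id or meeting_id in seen:
--             continue
--         seen.add(meeting_id)
--         normalized.append(meeting_id)
--     return sorted(normalized)
-- ===== SOURCE B (Python) =====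
-- from typing import Any
--
-- def normalize_meeting_ids(raw_ids: Any) -> list[str]:
--     if not isinstance(raw_ids, list):
--         return []
--     cleaned = sorted(s for s in (str(x or "").strip() for x in raw_ids) if s)
--     out: list[str] = []
--     prev = None
--     for s in cleaned:
--         if s != prev:
--             out.append(s)
--             prev = s
--     return out
-- ===== Notes on version B (the rewrite author's own statement) =====
-- stated objective: alternative
-- what changed: Replaces the seen-set membership dedup during the collection pass by sort-then-adjacent-dedup: normalize and filter into a plain list, sort it, then one pass keeping each element only when it differs from the previous one.
import Mathlib
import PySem

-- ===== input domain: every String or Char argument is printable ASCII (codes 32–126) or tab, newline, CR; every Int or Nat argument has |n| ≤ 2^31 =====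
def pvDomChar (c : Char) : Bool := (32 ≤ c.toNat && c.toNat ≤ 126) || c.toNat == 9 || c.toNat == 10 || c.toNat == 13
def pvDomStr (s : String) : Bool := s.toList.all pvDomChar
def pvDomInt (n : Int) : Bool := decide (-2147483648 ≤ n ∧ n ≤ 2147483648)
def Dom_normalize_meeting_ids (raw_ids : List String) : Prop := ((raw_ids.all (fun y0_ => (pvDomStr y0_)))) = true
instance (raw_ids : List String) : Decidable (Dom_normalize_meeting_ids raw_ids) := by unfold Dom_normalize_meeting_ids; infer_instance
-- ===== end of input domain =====

-- B dedups by sort-then-adjacency instead of A's seen-set; equal return value on all inputs.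
-- (The Lean arguments are typed List String, so Python's isinstance-guard and `x or ""`/str() coercion
--  reduce to the identity on each element: str(x or "").strip() = x.strip() for a string x.)

-- ===== PORT A =====
def normalize_meeting_ids (raw_ids : List String) : List String :=
  let st := raw_ids.foldl
    (fun (acc : List String × PySem.Set String) raw_value =>
      let meeting_id := PySem.Str.strip raw_value
      if meeting_id = "" ∨ meeting_id ∈ acc.2 then acc
      else (acc.1 ++ [meeting_id], PySem.Set.add acc.2 meeting_id))
    ([], PySem.Set.empty)
  PySem.List.sorted st.1 (fun x => x) false

-- ===== PORT B =====
def normalize_meeting_ids_alt (raw_ids : List String) : List String :=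
  let cleaned := (raw_ids.map PySem.Str.strip).filter (fun s => decide (s ≠ ""))
  let sortedList := PySem.List.sorted cleaned (fun x => x) false
  let st := sortedList.foldl
    (fun (acc : List String × Option String) s =>
      if some s = acc.2 then acc else (acc.1 ++ [s], some s))
    ([], none)
  st.1

-- ===== PRECONDITION & SPEC =====
def Spec_normalize_meeting_ids (raw_ids : List String) (out : List String) : Prop := out = normalize_meeting_ids_alt raw_ids
instance (raw_ids : List String) (out : List String) : Decidable (Spec_normalize_meeting_ids raw_ids out) := by unfold Spec_normalize_meeting_ids; infer_instance

-- ===== CLAIM (what is proved, stated in full; the proofs are below) =====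
def Claim_equal_normalize_meeting_ids : Prop := ∀ (raw_ids : List String), Dom_normalize_meeting_ids raw_ids → Spec_normalize_meeting_ids raw_ids (normalize_meeting_ids raw_ids)

-- ===== LEMMAS AND PROOFS =====

-- A's collection loop: starting from a nodup accumulator whose seen-set has exactly its elements,
-- the result is nodup and contains exactly the old elements plus the non-empty strips of xs.
theorem pvLoopA (xs : List String) : ∀ (n : List String) (s : PySem.Set String),
    (∀ a, a ∈ s ↔ a ∈ n) → n.Nodup →
    ((xs.foldl
      (fun (acc : List String × PySem.Set String) raw_value =>
        let meeting_id := PySem.Str.strip raw_value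
        if meeting_id = "" ∨ meeting_id ∈ acc.2 then acc
        else (acc.1 ++ [meeting_id], PySem.Set.add acc.2 meeting_id))
      (n, s)).1).Nodup ∧
    (∀ a, a ∈ (xs.foldl
      (fun (acc : List String × PySem.Set String) raw_value =>
        let meeting_id := PySem.Str.strip raw_value
        if meeting_id = "" ∨ meeting_id ∈ acc.2 then acc
        else (acc.1 ++ [meeting_id], PySem.Set.add acc.2 meeting_id))
      (n, s)).1 ↔ a ∈ n ∨ (a ∈ xs.map PySem.Str.strip ∧ a ≠ "")) := by
  induction xs with
  | nil => intro n s hs hn; exact ⟨hn, by simp⟩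
  | cons r xs ih =>
    intro n s hs hn
    simp only [List.foldl_cons]
    by_cases h : PySem.Str.strip r = "" ∨ PySem.Str.strip r ∈ s
    · simp only [h, if_pos]
      obtain ⟨h1, h2⟩ := ih n s hs hn
      refine ⟨h1, fun a => (h2 a).trans ?_⟩
      constructor
      · rintro (ha | ha); · exact Or.inl ha
        · exact Or.inr ⟨by simp [ha.1], ha.2⟩
      · rintro (ha | ⟨ha, hne⟩); · exact Or.inl ha
        · simp only [List.map_cons, List.mem_cons] at ha
          rcases ha with rfl | ha
          · rcases h with h | h
            · exact absurd h hne
            · exact Or.inl ((hs _).mp h)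
          · exact Or.inr ⟨ha, hne⟩
    · push_neg at h
      have hcond : ¬(PySem.Str.strip r = "" ∨ PySem.Str.strip r ∈ s) := by
        rintro (hc | hc); exacts [h.1 hc, h.2 hc]
      simp only [if_neg hcond]
      have hmn : PySem.Str.strip r ∉ n := fun hc => h.2 ((hs _).mpr hc)
      obtain ⟨h1, h2⟩ := ih (n ++ [PySem.Str.strip r]) (PySem.Set.add s (PySem.Str.strip r))
        (fun a => by
          rw [PySem.Set.mem_add]
          simp only [List.mem_append, List.mem_singleton]
          exact or_congr (hs a) Iff.rfl)
        (by
          rw [List.nodup_append]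
          refine ⟨hn, List.nodup_singleton _, ?_⟩
          intro a ha b hb
          rw [List.mem_singleton] at hb
          subst hb
          exact fun hc => hmn (hc ▸ ha))
      refine ⟨h1, fun a => (h2 a).trans ?_⟩
      simp only [List.mem_append, List.mem_cons, List.not_mem_nil, or_false, List.map_cons]
      constructor
      · rintro ((ha | rfl) | ⟨ha, hne⟩)
        · exact Or.inl ha
        · exact Or.inr ⟨Or.inl rfl, h.1⟩
        · exact Or.inr ⟨Or.inr ha, hne⟩
      · rintro (ha | ⟨(rfl | ha), hne⟩)
        · exact Or.inl (Or.inl ha)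
        · exact Or.inl (Or.inr rfl)
        · exact Or.inr ⟨ha, hne⟩

-- B's adjacency loop on a (≤)-sorted input: result strictly increasing, with the expected membership.
theorem pvLoopB (l : List String) : ∀ (out : List String) (p : Option String),
    l.Pairwise (· ≤ ·) →
    (∀ z ∈ l, ∀ v, p = some v → v ≤ z) →
    out.Pairwise (· < ·) →
    (∀ o ∈ out, ∀ v, p = some v → o ≤ v) →
    (p = none → out = []) →
    (∀ v, p = some v → v ∈ out) →
    ((l.foldl
      (fun (acc : List String × Option String) s =>
        if some s = acc.2 then acc else (acc.1 ++ [s], some s))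
      (out, p)).1).Pairwise (· < ·) ∧
    (∀ a, a ∈ (l.foldl
      (fun (acc : List String × Option String) s =>
        if some s = acc.2 then acc else (acc.1 ++ [s], some s))
      (out, p)).1 ↔ a ∈ out ∨ a ∈ l) := by
  induction l with
  | nil => intro out p _ _ h3 _ _ _; exact ⟨h3, by simp⟩
  | cons x l ih =>
    intro out p h1 h2 h3 h4 h5 h6
    simp only [List.foldl_cons]
    by_cases hx : some x = p
    · simp only [if_pos hx]
      obtain ⟨g1, g2⟩ := ih out p (h1.sublist (List.sublist_cons_self x l))
        (fun z hz v hv => h2 z (List.mem_cons_of_mem x hz) v hv) h3 h4 h5 h6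
      refine ⟨g1, fun a => (g2 a).trans ?_⟩
      constructor
      · rintro (ha | ha); · exact Or.inl ha
        · exact Or.inr (List.mem_cons_of_mem x ha)
      · rintro (ha | ha); · exact Or.inl ha
        · rcases List.mem_cons.mp ha with rfl | ha
          · exact Or.inl (h6 a hx.symm)
          · exact Or.inr ha
    · simp only [if_neg hx]
      have hox : ∀ o ∈ out, o < x := by
        intro o ho
        match p, h5 with
        | none, h5 => simp [h5 rfl] at ho
        | some v, _ =>
          have hvx : v ≤ x := h2 x (List.mem_cons_self) v rfl
          have hov : o ≤ v := h4 o ho v rfl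
          have : v ≠ x := fun hc => hx (by rw [hc])
          exact lt_of_le_of_lt hov (lt_of_le_of_ne hvx this)
      obtain ⟨g1, g2⟩ := ih (out ++ [x]) (some x)
        (h1.sublist (List.sublist_cons_self x l))
        (fun z hz v hv => by
          cases Option.some.inj hv
          exact (List.pairwise_cons.mp h1).1 z hz)
        (by
          rw [List.pairwise_append]
          exact ⟨h3, List.pairwise_singleton _ _, by simpa using hox⟩)
        (fun o ho v hv => by
          cases Option.some.inj hv
          rcases List.mem_append.mp ho with ho | ho
          · exact le_of_lt (hox o ho)
          · simp at ho; simp [ho])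
        (by simp)
        (fun v hv => by cases Option.some.inj hv; simp)
      refine ⟨g1, fun a => (g2 a).trans ?_⟩
      simp only [List.mem_append, List.mem_cons, List.not_mem_nil, or_false]
      tauto

-- ===== VERDICT (by name: the statement is the Claim_ definition above) =====
theorem normalize_meeting_ids_spec : Claim_equal_normalize_meeting_ids := by
  intro raw_ids _
  unfold Spec_normalize_meeting_ids normalize_meeting_ids normalize_meeting_ids_alt
  simp only []
  set cleaned := (raw_ids.map PySem.Str.strip).filter (fun s => decide (s ≠ "")) with hcl
  set sl := PySem.List.sorted cleaned (fun x => x) false with hsl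
  obtain ⟨ha1, ha2⟩ := pvLoopA raw_ids [] PySem.Set.empty (by simp [PySem.Set.empty]) List.nodup_nil
  obtain ⟨hb1, hb2⟩ := pvLoopB sl [] none
    (by simpa using PySem.List.sorted_pairwise cleaned (fun x => x))
    (by simp) List.Pairwise.nil (by simp) (fun _ => rfl) (by simp)
  apply PySem.List.sorted_eq_of_perm_of_pairwise_lt
  · -- the B result is a permutation of A's collected list
    rw [List.perm_comm]
    refine (List.perm_ext_iff_of_nodup ha1 (hb1.imp ne_of_lt)).mpr fun a => ?_
    rw [ha2 a, hb2 a]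
    simp only [List.not_mem_nil, false_or, hsl, PySem.List.mem_sorted, hcl, List.mem_filter,
      decide_eq_true_eq]
  · simpa using hb1
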